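-- pv_equiv track=rewrite | github.com/StirbuLarisa/Python | laborator3/ex6.py | count_unique_and_duplicate_elements
-- ===== SOURCE A (Python) =====
-- def count_unique_and_duplicate_elements(lst):
--     unique_elements = set()
--     duplicate_elements = set()
--
--     for item in lst:
--         if item in unique_elements:
--             duplicate_elements.add(item)
--         else:
--             unique_elements.add(item)
--
--     return len(unique_elements), len(duplicate_elements)
-- ===== SOURCE B (Python) =====
-- def count_unique_and_duplicate_elements(lst):
--     freq = {}
--     for item in lst:
--         freq[item] = freq.get(item, 0) + 1
--     duplicates = sum(1 for v in freq.values() if v > 1)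
--     return len(freq), duplicates
-- ===== Notes on version B (the rewrite author's own statement) =====
-- stated objective: idiomatic
-- what changed: Replaced the two-set membership-branch loop by a count-then-filter decomposition: one pass builds a frequency dict, then the answers are derived from it (len of the dict, count of values > 1).
import Mathlib
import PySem

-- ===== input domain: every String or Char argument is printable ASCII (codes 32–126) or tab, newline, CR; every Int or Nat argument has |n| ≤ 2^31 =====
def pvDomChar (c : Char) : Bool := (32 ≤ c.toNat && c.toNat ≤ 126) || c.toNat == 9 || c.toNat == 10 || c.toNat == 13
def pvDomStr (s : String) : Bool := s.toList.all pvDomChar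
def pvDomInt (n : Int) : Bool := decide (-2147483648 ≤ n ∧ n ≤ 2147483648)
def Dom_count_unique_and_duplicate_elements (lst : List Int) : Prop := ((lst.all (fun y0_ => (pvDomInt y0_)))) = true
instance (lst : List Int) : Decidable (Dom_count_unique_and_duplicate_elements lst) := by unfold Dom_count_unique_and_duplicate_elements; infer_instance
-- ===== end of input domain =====

-- B replaces A's incremental two-set membership loop by a count-then-filter decomposition
-- (build a frequency dict in one pass, then read both answers off it); same O(n) cost.


-- ===== PORT A =====
def count_unique_and_duplicate_elements (lst : List Int) : Int × Int :=
  let st := lst.foldl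
    (fun (p : PySem.Set Int × PySem.Set Int) item =>
      if PySem.Set.contains p.1 item then (p.1, PySem.Set.add p.2 item)
      else (PySem.Set.add p.1 item, p.2))
    (PySem.Set.empty, PySem.Set.empty)
  (PySem.Set.len st.1, PySem.Set.len st.2)

-- ===== PORT B =====
def count_unique_and_duplicate_elements_alt (lst : List Int) : Int × Int :=
  let freq := lst.foldl (fun (d : PySem.Dict Int Int) item => d.insert item (d.getD item 0 + 1)) PySem.Dict.empty
  let duplicates : Int := (freq.values.countP (fun v => decide (1 < v)) : Nat)
  ((freq.size : Nat), duplicates)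

-- ===== PRECONDITION & SPEC =====
def Spec_count_unique_and_duplicate_elements (lst : List Int) (out : Int × Int) : Prop := out = count_unique_and_duplicate_elements_alt lst
instance (lst : List Int) (out : Int × Int) : Decidable (Spec_count_unique_and_duplicate_elements lst out) := by unfold Spec_count_unique_and_duplicate_elements; infer_instance

-- ===== CLAIM (what is proved, stated in full; the proofs are below) =====
def Claim_equal_count_unique_and_duplicate_elements : Prop := ∀ (lst : List Int), Dom_count_unique_and_duplicate_elements lst → Spec_count_unique_and_duplicate_elements lst (count_unique_and_duplicate_elements lst)

-- ===== LEMMAS AND PROOFS =====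

-- Invariant of A's loop: starting from Nodup sets (u, d), the final first set holds the
-- elements of u and of lst, and the final second set holds the elements of d, the
-- elements of lst already in u, and the elements occurring at least twice in lst.
theorem aFold_inv (lst : List Int) : ∀ (u d : PySem.Set Int), u.Nodup → d.Nodup →
    (let r := lst.foldl
      (fun (p : PySem.Set Int × PySem.Set Int) item =>
        if PySem.Set.contains p.1 item then (p.1, PySem.Set.add p.2 item)
        else (PySem.Set.add p.1 item, p.2)) (u, d)
    r.1.Nodup ∧ r.2.Nodup ∧ (∀ x, x ∈ r.1 ↔ x ∈ u ∨ x ∈ lst) ∧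
      (∀ x, x ∈ r.2 ↔ x ∈ d ∨ (x ∈ u ∧ x ∈ lst) ∨ 2 ≤ lst.count x)) := by
  induction lst with
  | nil => intro u d hu hd; exact ⟨hu, hd, by simp, by simp⟩
  | cons item rest ih =>
    intro u d hu hd
    simp only [List.foldl_cons]
    by_cases hm : item ∈ u
    · have hc : PySem.Set.contains u item = true := (PySem.Set.contains_iff u item).mpr hm
      simp only [hc, if_pos]
      obtain ⟨h1, h2, h3, h4⟩ := ih u (PySem.Set.add d item) hu (PySem.Set.nodup_add d item hd)
      refine ⟨h1, h2, ?_, ?_⟩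
      · intro x
        rw [h3 x]
        constructor
        · rintro (h | h) <;> simp [h]
        · rintro (h | h)
          · exact Or.inl h
          · rcases List.mem_cons.mp h with h | h
            · exact Or.inl (h ▸ hm)
            · exact Or.inr h
      · intro x
        rw [h4 x, PySem.Set.mem_add]
        by_cases hx : x = item
        · subst hx
          constructor
          · intro _; exact Or.inr (Or.inl ⟨hm, List.mem_cons_self⟩)
          · intro _; exact Or.inl (Or.inr rfl)
        · have hcnt : List.count x (item :: rest) = List.count x rest := by
            rw [List.count_cons]; simp [Ne.symm hx]
          rw [hcnt]
          simp only [List.mem_cons, hx, false_or, or_false]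
    · have hc : PySem.Set.contains u item = false := by
        cases h : PySem.Set.contains u item
        · rfl
        · exact absurd ((PySem.Set.contains_iff u item).mp h) hm
      simp only [hc, Bool.false_eq_true, if_neg, not_false_iff]
      obtain ⟨h1, h2, h3, h4⟩ := ih (PySem.Set.add u item) d (PySem.Set.nodup_add u item hu) hd
      refine ⟨h1, h2, ?_, ?_⟩
      · intro x
        rw [h3 x, PySem.Set.mem_add]
        simp [List.mem_cons]
        tauto
      · intro x
        rw [h4 x, PySem.Set.mem_add]
        by_cases hx : x = item
        · subst hx
          rw [List.count_cons_self]
          constructor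
          · rintro (h | ⟨_, hr⟩ | h)
            · exact Or.inl h
            · refine Or.inr (Or.inr ?_)
              have := List.count_pos_iff.mpr hr
              omega
            · exact Or.inr (Or.inr (by omega))
          · rintro (h | ⟨hu', _⟩ | h)
            · exact Or.inl h
            · exact absurd hu' hm
            · have hr : x ∈ rest := List.count_pos_iff.mp (by omega)
              exact Or.inr (Or.inl ⟨Or.inr rfl, hr⟩)
        · have hcnt : List.count x (item :: rest) = List.count x rest := by
            rw [List.count_cons]; simp [Ne.symm hx]
          rw [hcnt]
          simp only [List.mem_cons, hx, false_or, or_false]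

theorem count_a_eq (lst : List Int) :
    count_unique_and_duplicate_elements lst =
      (((PySem.Set.ofList lst).length : Int),
       (((PySem.Set.ofList lst).filter (fun k => decide (1 < lst.count k))).length : Int)) := by
  obtain ⟨h1, h2, h3, h4⟩ := aFold_inv lst PySem.Set.empty PySem.Set.empty List.nodup_nil List.nodup_nil
  unfold count_unique_and_duplicate_elements
  have e1 : (lst.foldl
      (fun (p : PySem.Set Int × PySem.Set Int) item =>
        if PySem.Set.contains p.1 item then (p.1, PySem.Set.add p.2 item)
        else (PySem.Set.add p.1 item, p.2)) (PySem.Set.empty, PySem.Set.empty)).1.Perm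
      (PySem.Set.ofList lst) := by
    rw [List.perm_ext_iff_of_nodup h1 (PySem.Set.nodup_ofList lst)]
    intro a
    rw [h3 a, PySem.Set.mem_ofList]
    simp [PySem.Set.empty]
  have e2 : (lst.foldl
      (fun (p : PySem.Set Int × PySem.Set Int) item =>
        if PySem.Set.contains p.1 item then (p.1, PySem.Set.add p.2 item)
        else (PySem.Set.add p.1 item, p.2)) (PySem.Set.empty, PySem.Set.empty)).2.Perm
      ((PySem.Set.ofList lst).filter (fun k => decide (1 < lst.count k))) := by
    rw [List.perm_ext_iff_of_nodup h2 ((PySem.Set.nodup_ofList lst).filter _)]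
    intro a
    rw [h4 a, List.mem_filter, PySem.Set.mem_ofList]
    simp [PySem.Set.empty]
    constructor
    · intro h
      exact ⟨List.count_pos_iff.mp (by omega), by omega⟩
    · rintro ⟨_, h⟩
      omega
  simp only [PySem.Set.len, e1.length_eq, e2.length_eq]

theorem count_b_eq (lst : List Int) :
    count_unique_and_duplicate_elements_alt lst =
      (((PySem.Set.ofList lst).length : Int),
       (((PySem.Set.ofList lst).filter (fun k => decide (1 < lst.count k))).length : Int)) := by
  unfold count_unique_and_duplicate_elements_alt
  have hkeys : (lst.foldl (fun (d : PySem.Dict Int Int) item => d.insert item (d.getD item 0 + 1)) PySem.Dict.empty).keys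
      = PySem.Set.ofList lst := by
    rw [PySem.Dict.keys_foldl_insert lst (fun d x => d.getD x 0 + 1) PySem.Dict.empty]
    rfl
  have hnd : (lst.foldl (fun (d : PySem.Dict Int Int) item => d.insert item (d.getD item 0 + 1)) PySem.Dict.empty).keys.Nodup := by
    rw [hkeys]; exact PySem.Set.nodup_ofList lst
  have hvals := PySem.Dict.values_eq_map_keys _ hnd (0 : Int)
  have hget : ∀ k, (lst.foldl (fun (d : PySem.Dict Int Int) item => d.insert item (d.getD item 0 + 1)) PySem.Dict.empty).getD k 0
      = (lst.count k : Int) := by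
    intro k
    rw [PySem.Dict.getD_foldl_insert_add_one lst PySem.Dict.empty k]
    simp [PySem.Dict.getD, PySem.Dict.empty, PySem.Dict.get?]
  have hsize : (lst.foldl (fun (d : PySem.Dict Int Int) item => d.insert item (d.getD item 0 + 1)) PySem.Dict.empty).size
      = (PySem.Set.ofList lst).length := by
    have : ∀ (d : PySem.Dict Int Int), d.size = d.keys.length := by
      intro d; simp [PySem.Dict.size, PySem.Dict.keys]
    rw [this, hkeys]
  have hdup : (lst.foldl (fun (d : PySem.Dict Int Int) item => d.insert item (d.getD item 0 + 1)) PySem.Dict.empty).values.countP (fun v => decide (1 < v))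
      = ((PySem.Set.ofList lst).filter (fun k => decide (1 < lst.count k))).length := by
    rw [hvals, hkeys, List.countP_map, List.countP_eq_length_filter]
    congr 1
    apply List.filter_congr
    intro x hx
    simp only [Function.comp_apply, hget x]
    norm_num
  simp only [hsize, hdup]

-- ===== VERDICT (by name: the statement is the Claim_ definition above) =====
theorem count_unique_and_duplicate_elements_spec : Claim_equal_count_unique_and_duplicate_elements := by
  intro lst _
  show _ = _
  rw [count_a_eq, count_b_eq]
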